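-- pv_equiv track=rewrite | github.com/andmansim/ejercicios-ordenar | especificaciones/funciones.py | segmentos
-- ===== SOURCE A (Python) =====
-- def segmentos (i, fin, t):
--     segmento = []
--     e = 0
--     s_total = [] #lista que contiene a todos los segmentos
--     for k in range (i, fin + 1):
--
--         if t[k] > t[i]: # solo pasa aquellos que son mayor que el primero
--
--             for j in range(i, k): # los añadimos a segmento
--                 segmento.append(t[j])
--
--             s_total.append(segmento) # añadimos el segmento al total
--             segmento = []
--
--             e = k # nos guarda el último valor de k para luego empezar con él
--             i = k
--
--         if k == fin: #añade los sobrantes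
--             segmento = []
--
--             for g in range (e, fin + 1):
--                 segmento.append(t[g])
--
--             s_total.append(segmento)
--     return s_total
-- ===== SOURCE B (Python) =====
-- def segmentos(i, fin, t):
--     # pass 1: collect the breakpoint indices (where a value exceeds the current segment start)
--     breaks = []
--     start = i
--     for k in range(i, fin + 1):
--         if t[k] > t[start]:
--             breaks.append(k)
--             start = k
--     # pass 2: build each segment as a slice between consecutive breakpoints
--     out = []
--     prev = i
--     for b in breaks:
--         out.append(t[prev:b])
--         prev = b
--     if i <= fin:
--         out.append(t[prev:fin + 1])
--     return out
-- ===== Notes on version B (the rewrite author's own statement) =====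
-- stated objective: alternative
-- what changed: Replaces A's single loop with nested element-append loops by a two-pass design: first collect the breakpoint index list, then build each segment as a slice between consecutive breakpoints; Pre_ excludes inputs where A raises IndexError and negative starts i, where A returns only via negative-index wraparound.
-- intended difference: On inputs with 0 < i <= fin where no element of t[i:fin+1] exceeds t[i], A returns [t[0:fin+1]] (its leftover-segment start variable e is never updated from its 0 default), while B returns [t[i:fin+1]], the intended segment starting at i. — e.g. on segmentos(1, 2, [5, 3, 1]): A returns [[5, 3, 1]], B returns [[3, 1]]
-- outside the precondition, e.g. on segmentos(-1, 0, [3, 1]): A returns [[1], [3]], B returns [[], [3]]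
import Mathlib
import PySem

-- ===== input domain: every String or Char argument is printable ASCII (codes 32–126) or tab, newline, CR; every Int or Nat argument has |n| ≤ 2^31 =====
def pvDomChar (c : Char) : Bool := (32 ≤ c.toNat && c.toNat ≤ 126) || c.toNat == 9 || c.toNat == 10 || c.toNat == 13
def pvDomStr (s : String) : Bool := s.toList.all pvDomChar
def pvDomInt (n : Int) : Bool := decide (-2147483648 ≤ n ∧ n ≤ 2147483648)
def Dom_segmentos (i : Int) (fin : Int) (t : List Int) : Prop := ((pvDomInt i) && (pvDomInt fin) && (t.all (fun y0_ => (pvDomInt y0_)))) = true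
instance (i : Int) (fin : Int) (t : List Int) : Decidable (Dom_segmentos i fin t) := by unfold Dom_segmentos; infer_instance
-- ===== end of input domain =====

-- B replaces A's nested element-append loops by a two-pass design (breakpoint index list, then slices);
-- same cost, different decomposition; on D_ (no breakpoint, i > 0) B starts the leftover segment at i where A starts it at 0.


-- ===== PORT A =====
-- for j in range(a, b): seg.append(t[j])   (pyGetD is exact under Pre_, where every accessed index is in range)
def segAppendLoop (t : List Int) (a b : Int) (seg : List Int) : List Int :=
  (PySem.List.pyRange a b 1).foldl (fun seg j => seg ++ [PySem.List.pyGetD t j 0]) seg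

-- one iteration of A's main loop; state = (segmento, e, s_total, i)
def segStepA (t : List Int) (fin : Int)
    (st : List Int × Int × List (List Int) × Int) (k : Int) :
    List Int × Int × List (List Int) × Int :=
  let st :=
    if PySem.List.pyGetD t k 0 > PySem.List.pyGetD t st.2.2.2 0 then
      (([] : List Int), k, st.2.2.1 ++ [segAppendLoop t st.2.2.2 k st.1], k)
    else st
  if k = fin then
    (segAppendLoop t st.2.1 (fin + 1) [], st.2.1,
     st.2.2.1 ++ [segAppendLoop t st.2.1 (fin + 1) []], st.2.2.2)
  else st

def segmentos (i : Int) (fin : Int) (t : List Int) : List (List Int) :=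
  ((PySem.List.pyRange i (fin + 1) 1).foldl (segStepA t fin)
    (([] : List Int), 0, ([] : List (List Int)), i)).2.2.1

-- ===== PORT B =====
-- pass 1: collect breakpoint indices; state = (breaks, start)
def segStep1 (t : List Int) (st : List Int × Int) (k : Int) : List Int × Int :=
  if PySem.List.pyGetD t k 0 > PySem.List.pyGetD t st.2 0 then (st.1 ++ [k], k) else st

-- pass 2: slice between consecutive breakpoints; state = (out, prev)
def segStep2 (t : List Int) (st : List (List Int) × Int) (b : Int) :
    List (List Int) × Int :=
  (st.1 ++ [PySem.List.slice t (some st.2) (some b)], b)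

def segmentos_alt (i : Int) (fin : Int) (t : List Int) : List (List Int) :=
  let p1 := (PySem.List.pyRange i (fin + 1) 1).foldl (segStep1 t) (([] : List Int), i)
  let p2 := p1.1.foldl (segStep2 t) (([] : List (List Int)), i)
  if i ≤ fin then p2.1 ++ [PySem.List.slice t (some p2.2) (some (fin + 1))] else p2.1

-- ===== PRECONDITION & SPEC =====
-- Pre_ excludes (a) inputs where A raises IndexError (an index in [i, fin] out of t's range) and
-- (b) a negative start i with i ≤ fin, where A returns a value only through Python's
-- negative-index wraparound, an artefact of A's implementation (B's slices clamp there; see claim.json cites).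
def Pre_segmentos (i : Int) (fin : Int) (t : List Int) : Prop :=
  fin < i ∨ (0 ≤ i ∧ fin < t.length)
instance (i : Int) (fin : Int) (t : List Int) : Decidable (Pre_segmentos i fin t) := by
  unfold Pre_segmentos; infer_instance

def pvWitness_segmentos : Int × Int × List Int := (0, 3, [2, 5, 1, 4])

-- On inputs with 0 < i ≤ fin where no element of t[i:fin+1] exceeds t[i], A returns [t[0:fin+1]]
-- (its leftover-segment start e keeps its 0 default), while B returns [t[i:fin+1]], the intended
-- segment starting at i.
def D_segmentos (i : Int) (fin : Int) (t : List Int) : Prop :=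
  0 < i ∧ i ≤ fin ∧
    ((PySem.List.pyRange i (fin + 1) 1).all
      (fun k => PySem.List.pyGetD t k 0 ≤ PySem.List.pyGetD t i 0)) = true
instance (i : Int) (fin : Int) (t : List Int) : Decidable (D_segmentos i fin t) := by
  unfold D_segmentos; infer_instance

def Spec_segmentos (i : Int) (fin : Int) (t : List Int) (out : List (List Int)) : Prop :=
  ¬ D_segmentos i fin t → out = segmentos_alt i fin t
instance (i : Int) (fin : Int) (t : List Int) (out : List (List Int)) : Decidable (Spec_segmentos i fin t out) := by unfold Spec_segmentos; infer_instance

def pvDiffWitness_segmentos : Int × Int × List Int := (1, 2, [5, 3, 1])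
def pvDiffWitnessOut_segmentos : (List (List Int)) × (List (List Int)) :=
  ([[5, 3, 1]], [[3, 1]])

-- ===== CLAIM (what is proved, stated in full; the proofs are below) =====
def Claim_unchanged_segmentos : Prop := ∀ (i : Int) (fin : Int) (t : List Int), Dom_segmentos i fin t → Pre_segmentos i fin t → Spec_segmentos i fin t (segmentos i fin t)
def Claim_changed_segmentos : Prop := Dom_segmentos (pvDiffWitness_segmentos.1) (pvDiffWitness_segmentos.2.1) (pvDiffWitness_segmentos.2.2) ∧ Pre_segmentos (pvDiffWitness_segmentos.1) (pvDiffWitness_segmentos.2.1) (pvDiffWitness_segmentos.2.2) ∧ D_segmentos (pvDiffWitness_segmentos.1) (pvDiffWitness_segmentos.2.1) (pvDiffWitness_segmentos.2.2) ∧ segmentos (pvDiffWitness_segmentos.1) (pvDiffWitness_segmentos.2.1) (pvDiffWitness_segmentos.2.2) = pvDiffWitnessOut_segmentos.1 ∧ segmentos_alt (pvDiffWitness_segmentos.1) (pvDiffWitness_segmentos.2.1) (pvDiffWitness_segmentos.2.2) = pvDiffWitnessOut_segmentos.2 ∧ pvDiffWitnessOut_segmentos.1 ≠ pvDiffWitn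essOut_segmentos.2
def Claim_exact_segmentos : Prop := ∀ (i : Int) (fin : Int) (t : List Int), Dom_segmentos i fin t → Pre_segmentos i fin t → D_segmentos i fin t → segmentos i fin t ≠ segmentos_alt i fin t

-- ===== LEMMAS AND PROOFS =====

-- common functional specification of the remaining loop: fuel n counts iterations before k reaches fin;
-- s is the current segment start, e the stored start of the leftover segment
def segSpec (t : List Int) (fin : Int) : Nat → Int → Int → List (List Int)
  | 0, s, e =>
      if PySem.List.pyGetD t fin 0 > PySem.List.pyGetD t s 0 then
        [PySem.List.slice t (some s) (some fin), PySem.List.slice t (some fin) (some (fin + 1))]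
      else [PySem.List.slice t (some e) (some (fin + 1))]
  | n + 1, s, e =>
      if PySem.List.pyGetD t (fin - (n + 1)) 0 > PySem.List.pyGetD t s 0 then
        PySem.List.slice t (some s) (some (fin - (n + 1))) ::
          segSpec t fin n (fin - (n + 1)) (fin - (n + 1))
      else segSpec t fin n s e

lemma slice_cons_left (t : List Int) (a b : Int) (h0 : 0 ≤ a) (h1 : a < b) (h2 : a < t.length) :
    PySem.List.slice t (some a) (some b) = PySem.List.pyGetD t a 0 :: PySem.List.slice t (some (a+1)) (some b) := by
  rw [PySem.List.slice_toNat t h0 (by omega), PySem.List.slice_toNat t (by omega) (by omega),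
      PySem.List.pyGetD_eq_getElem t 0 h0 (by omega)]
  rw [List.drop_eq_getElem_cons (show a.toNat < t.length by omega)]
  have h3 : (a+1).toNat = a.toNat + 1 := by omega
  have h4 : b.toNat - a.toNat = (b.toNat - (a.toNat + 1)) + 1 := by omega
  rw [h3, h4, List.take_succ_cons]

-- A's element-append loop over range(a, b) builds exactly the slice t[a:b]
lemma segAppendLoop_slice (t : List Int) (a b : Int)
    (ha : 0 ≤ a) (hab : a ≤ b) (hb : b ≤ t.length) :
    segAppendLoop t a b [] = PySem.List.slice t (some a) (some b) := by
  rw [segAppendLoop, PySem.List.foldl_append_singleton_eq_map, List.nil_append]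
  obtain ⟨n, hn⟩ : ∃ n : Nat, b = a + n := ⟨(b-a).toNat, by omega⟩
  subst hn
  induction n generalizing a with
  | zero =>
      rw [PySem.List.pyRange_one_eq_nil (by omega), PySem.List.slice_toNat t ha (by omega)]
      simp
  | succ m ih =>
      push_cast at hab hb ⊢
      rw [PySem.List.pyRange_one_cons (by omega),
          slice_cons_left t a (a + ((m:Int)+1)) ha (by omega) (by omega), List.map_cons]
      have he : a + ((m:Int)+1) = (a+1) + (m:Int) := by omega
      rw [he]
      have := ih (a+1) (by omega) (by omega) (by omega)
      push_cast at this
      rw [this]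

lemma segStep2_prefix (t : List Int) (bs : List Int) (out : List (List Int)) (p : Int) :
    bs.foldl (segStep2 t) (out, p) =
      (out ++ (bs.foldl (segStep2 t) ([], p)).1, (bs.foldl (segStep2 t) ([], p)).2) := by
  induction bs generalizing out p with
  | nil => simp
  | cons b bs ih =>
      simp only [List.foldl_cons, segStep2, List.nil_append]
      rw [ih, ih (out := [PySem.List.slice t (some p) (some b)])]
      simp

lemma segStep1_prefix (t : List Int) (ks : List Int) (out : List Int) (s : Int) :
    ks.foldl (segStep1 t) (out, s) =
      (out ++ (ks.foldl (segStep1 t) ([], s)).1, (ks.foldl (segStep1 t) ([], s)).2) := by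
  induction ks generalizing out s with
  | nil => simp
  | cons k ks ih =>
      simp only [List.foldl_cons, segStep1, List.nil_append]
      split_ifs with h
      · rw [ih, ih (out := [k])]; simp
      · exact ih out s

-- B's generalized remainder, started at a = fin - n with segment start s
def segBgen (t : List Int) (fin : Int) (n : Nat) (s : Int) : List (List Int) :=
  let p1 := (PySem.List.pyRange (fin - n) (fin + 1) 1).foldl (segStep1 t) (([] : List Int), s)
  let p2 := p1.1.foldl (segStep2 t) (([] : List (List Int)), s)
  p2.1 ++ [PySem.List.slice t (some p2.2) (some (fin + 1))]

lemma segBgen_eq_spec (t : List Int) (fin : Int) (n : Nat) (s : Int) :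
    segBgen t fin n s = segSpec t fin n s s := by
  induction n generalizing s with
  | zero =>
      simp only [segBgen, segSpec, Nat.cast_zero, sub_zero]
      rw [PySem.List.pyRange_one_cons (by omega), PySem.List.pyRange_one_eq_nil (by omega)]
      simp only [List.foldl_cons, List.foldl_nil, segStep1, List.nil_append]
      split_ifs with h
      · simp [segStep2]
      · simp
  | succ n ih =>
      simp only [segBgen, segSpec]
      have hcast : fin - ((n:Nat)+1:Nat) = fin - ((n:Int)+1) := by push_cast; ring
      rw [hcast]
      rw [PySem.List.pyRange_one_cons (by omega)]
      have hr : fin - ((n:Int)+1) + 1 = fin - (n:Nat) := by omega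
      simp only [List.foldl_cons, segStep1, List.nil_append]
      split_ifs with h
      · rw [segStep1_prefix]
        dsimp only [List.singleton_append]
        rw [List.foldl_cons]
        simp only [segStep2, List.nil_append]
        rw [segStep2_prefix]
        have := ih (fin - ((n:Int)+1))
        simp only [segBgen] at this
        simp only [List.cons_append, List.nil_append] at this ⊢
        rw [← hr] at this
        rw [← this]
      · have := ih s
        simp only [segBgen] at this
        rw [← hr] at this
        rw [← this]

lemma segA_eq_spec (t : List Int) (fin : Int) (hlen : fin < t.length) (n : Nat) :
    ∀ (s e : Int) (S : List (List Int)), 0 ≤ s → s ≤ fin - n → 0 ≤ e → e ≤ fin + 1 →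
    ((PySem.List.pyRange (fin - n) (fin + 1) 1).foldl (segStepA t fin) ([], e, S, s)).2.2.1 =
      S ++ segSpec t fin n s e := by
  induction n with
  | zero =>
      intro s e S hs0 hsf he0 hef
      simp only [Nat.cast_zero, sub_zero] at *
      rw [PySem.List.pyRange_one_cons (by omega), PySem.List.pyRange_one_eq_nil (by omega)]
      simp only [List.foldl_cons, List.foldl_nil, segStepA, segSpec]
      rw [if_pos trivial]
      split_ifs with h
      · dsimp only
        rw [segAppendLoop_slice t s fin hs0 hsf (by omega),
            segAppendLoop_slice t fin (fin+1) (by omega) (by omega) (by omega)]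
        simp
      · dsimp only
        rw [segAppendLoop_slice t e (fin+1) he0 hef (by omega)]
  | succ n ih =>
      intro s e S hs0 hsf he0 hef
      have hcast : fin - ((n:Nat)+1:Nat) = fin - ((n:Int)+1) := by push_cast; ring
      have hr : fin - ((n:Int)+1) + 1 = fin - (n:Nat) := by omega
      rw [hcast] at hsf ⊢
      rw [PySem.List.pyRange_one_cons (by omega), List.foldl_cons]
      simp only [segStepA, segSpec]
      have hne : ¬ (fin - ((n:Int)+1) = fin) := by omega
      rw [if_neg hne]
      split_ifs with h
      · rw [hr, ih (fin - ((n:Int)+1)) (fin - ((n:Int)+1)) _ (by omega) (by omega) (by omega) (by omega)]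
        rw [segAppendLoop_slice t s (fin - ((n:Int)+1)) hs0 (by omega) (by omega)]
        simp
      · rw [hr, ih s e S hs0 (by omega) he0 hef]

-- 'some index in [fin-n, fin] exceeds t[s]': the condition under which A's leftover start e is irrelevant
def hasBreak (t : List Int) (fin : Int) (n : Nat) (s : Int) : Prop :=
  ∃ k : Int, fin - n ≤ k ∧ k ≤ fin ∧ PySem.List.pyGetD t s 0 < PySem.List.pyGetD t k 0

lemma segSpec_e_irrel (t : List Int) (fin : Int) (n : Nat) (s e₁ e₂ : Int)
    (hb : hasBreak t fin n s) : segSpec t fin n s e₁ = segSpec t fin n s e₂ := by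
  induction n generalizing s e₁ e₂ with
  | zero =>
      obtain ⟨k, h1, h2, h3⟩ := hb
      have hk : k = fin := by push_cast at h1; omega
      subst hk
      simp only [segSpec]
      rw [if_pos h3, if_pos h3]
  | succ n ih =>
      simp only [segSpec]
      split_ifs with h
      · rfl
      · apply ih
        obtain ⟨k, h1, h2, h3⟩ := hb
        refine ⟨k, ?_, h2, h3⟩
        push_cast at h1 ⊢
        by_cases hk : k = fin - ((n:Int)+1)
        · exact absurd (hk ▸ h3) h
        · omega

lemma segSpec_noBreak (t : List Int) (fin : Int) (n : Nat) (s e : Int)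
    (hb : ¬ hasBreak t fin n s) :
    segSpec t fin n s e = [PySem.List.slice t (some e) (some (fin + 1))] := by
  induction n generalizing e with
  | zero =>
      simp only [segSpec]
      rw [if_neg (fun h => hb ⟨fin, by push_cast; omega, le_refl _, h⟩)]
  | succ n ih =>
      simp only [segSpec]
      rw [if_neg (fun h => hb ⟨fin - ((n:Int)+1), by push_cast; omega, by omega, h⟩)]
      exact ih e (by rintro ⟨k, h1, h2, h3⟩; exact hb ⟨k, by push_cast at h1 ⊢; omega, h2, h3⟩)

lemma segAlt_eq_spec (t : List Int) (i fin : Int) (hif : i ≤ fin) :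
    segmentos_alt i fin t = segSpec t fin (fin - i).toNat i i := by
  have hfi : fin - ((fin - i).toNat : Int) = i := by omega
  have : segmentos_alt i fin t = segBgen t fin (fin - i).toNat i := by
    simp only [segmentos_alt, segBgen, hfi, if_pos hif]
  rw [this, segBgen_eq_spec]

lemma slice_length (t : List Int) (a b : Int) (h0 : 0 ≤ a) (hab : a ≤ b) (hb : b ≤ t.length) :
    (PySem.List.slice t (some a) (some b)).length = (b - a).toNat := by
  rw [PySem.List.slice_toNat t h0 (by omega)]
  simp
  omega

-- ===== VERDICT (by name: the statement is the Claim_ definition above) =====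
theorem segmentos_spec : Claim_unchanged_segmentos := by
  intro i fin t _ hpre
  unfold Spec_segmentos
  intro hnD
  by_cases hif : fin < i
  · rw [segmentos, segmentos_alt, PySem.List.pyRange_one_eq_nil (by omega)]
    simp [if_neg (show ¬ i ≤ fin by omega)]
  · have hi : 0 ≤ i := by rcases hpre with h | h; omega; exact h.1
    have hlen : fin < t.length := by rcases hpre with h | h; omega; exact h.2
    have hfi : fin - ((fin - i).toNat : Int) = i := by omega
    have ha : segmentos i fin t = [] ++ segSpec t fin (fin - i).toNat i 0 := by
      have h := segA_eq_spec t fin hlen (fin - i).toNat i 0 [] hi (by omega) (by omega) (by omega)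
      rw [hfi] at h
      rw [segmentos]
      exact h
    rw [ha, segAlt_eq_spec t i fin (by omega), List.nil_append]
    by_cases hi0 : i = 0
    · rw [hi0]
    · -- i > 0 and ¬ D_: some element of t[i:fin+1] exceeds t[i]
      apply segSpec_e_irrel
      unfold D_segmentos at hnD
      have hex : ¬ ((PySem.List.pyRange i (fin + 1) 1).all
          (fun k => PySem.List.pyGetD t k 0 ≤ PySem.List.pyGetD t i 0)) = true := by
        intro hall
        exact hnD ⟨by omega, by omega, hall⟩
      rw [List.all_eq_true] at hex
      push Not at hex
      obtain ⟨k, hk, hgt⟩ := hex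
      rw [PySem.List.mem_pyRange_one] at hk
      refine ⟨k, by rw [hfi]; omega, by omega, by simpa using hgt⟩

theorem segmentos_changed : Claim_changed_segmentos := by
  unfold Claim_changed_segmentos; decide

theorem segmentos_tight : Claim_exact_segmentos := by
  intro i fin t _ hpre hD
  obtain ⟨hi0, hif, hall⟩ := hD
  have hi : 0 ≤ i := by omega
  have hlen : fin < t.length := by rcases hpre with h | h; omega; exact h.2
  have hfi : fin - ((fin - i).toNat : Int) = i := by omega
  have hnb : ¬ hasBreak t fin (fin - i).toNat i := by
    rintro ⟨k, h1, h2, h3⟩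
    rw [hfi] at h1
    rw [List.all_eq_true] at hall
    have := hall k (by rw [PySem.List.mem_pyRange_one]; omega)
    simp at this
    omega
  have ha : segmentos i fin t = [PySem.List.slice t (some 0) (some (fin + 1))] := by
    have h := segA_eq_spec t fin hlen (fin - i).toNat i 0 [] hi (by omega) (by omega) (by omega)
    rw [hfi] at h
    rw [segmentos, h, List.nil_append, segSpec_noBreak t fin _ i 0 hnb]
  have hb : segmentos_alt i fin t = [PySem.List.slice t (some i) (some (fin + 1))] := by
    rw [segAlt_eq_spec t i fin (by omega), segSpec_noBreak t fin _ i i hnb]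
  rw [ha, hb]
  intro heq
  have := congrArg (fun l => (l.headD []).length) heq
  simp only [List.headD_cons] at this
  rw [slice_length t 0 (fin+1) (by omega) (by omega) (by omega),
      slice_length t i (fin+1) hi (by omega) (by omega)] at this
  omega
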